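-- pv_equiv track=rewrite | github.com/MinTreesLearn/ML | Codeforces Submissions/1321/B/138472323.py | process
-- ===== SOURCE A (Python) =====
-- def process(B):
--
--     n = len(B)
--
--     d = {}
--
--     for i in range(n):
--
--         x = i-B[i]
--
--         if x not in d:
--
--             d[x] = [[], 0]
--
--         d[x][0].append([i, B[i]])
--
--         d[x][1]+=B[i]
--
--     my_max = 0
--
--     for x in d:
--
--         my_max = max(my_max, d[x][1])
--
--     return my_max
-- ===== SOURCE B (Python) =====
-- def process(B):
--     pairs = [(i - b, b) for i, b in enumerate(B)]
--     pairs.sort(key=lambda p: p[0])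
--     best = 0
--     run_key = None
--     run_sum = 0
--     for k, v in pairs:
--         if k != run_key:
--             best = max(best, run_sum)
--             run_key = k
--             run_sum = 0
--         run_sum += v
--     return max(best, run_sum)
-- ===== Notes on version B (the rewrite author's own statement) =====
-- stated objective: alternative
-- what changed: Replaces the hash-dictionary grouping (build per-key entry lists and sums, then a second pass over the keys) by a sort-then-single-scan: sort the (i-B[i], B[i]) pairs by key and fold once with a run accumulator, finalising each contiguous run's sum into the running maximum.
import Mathlib
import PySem

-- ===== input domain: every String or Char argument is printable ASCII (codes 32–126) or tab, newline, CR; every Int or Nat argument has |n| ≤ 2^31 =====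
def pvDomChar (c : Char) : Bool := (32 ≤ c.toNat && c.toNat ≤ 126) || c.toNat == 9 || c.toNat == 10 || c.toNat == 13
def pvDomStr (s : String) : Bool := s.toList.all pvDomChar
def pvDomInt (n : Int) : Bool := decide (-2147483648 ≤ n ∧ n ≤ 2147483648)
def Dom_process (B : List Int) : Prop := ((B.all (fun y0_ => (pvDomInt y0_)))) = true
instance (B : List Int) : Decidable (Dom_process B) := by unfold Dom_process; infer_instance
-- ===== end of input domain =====

-- B replaces A's hash-dictionary grouping by sort-the-pairs-then-one-scan grouping (alternative algorithm, similar cost).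

-- ===== PORT A =====
-- d[x][1] += B[i] / d[x][0].append([i, B[i]]): the dict value is the pair (list-of-[i,B[i]], sum).
-- B[i] is ported as pyGetD B i 0: i always lies in range here, so this is exact.
def process (B : List Int) : Int :=
  let n : Int := PySem.List.len B
  let d : PySem.Dict Int (List (List Int) × Int) :=
    (PySem.List.pyRange 0 n 1).foldl (fun d i =>
      let bi := PySem.List.pyGetD B i 0
      let x := i - bi
      let d := if d.contains x then d else d.insert x ([], 0)
      d.modify x ([], 0) (fun q => (q.1 ++ [[i, bi]], q.2 + bi))) PySem.Dict.empty
  -- 'for x in d: my_max = max(my_max, d[x][1])'; x is always a key, so getD's default is never used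
  d.keys.foldl (fun m x => max m (d.getD x ([], 0)).2) 0

-- ===== PORT B =====
def process_alt (B : List Int) : Int :=
  let pairs := (PySem.List.enumerate B 0).map (fun p => (p.1 - p.2, p.2))
  let sp := PySem.List.sorted pairs (fun p => p.1) false
  let st : Option Int × Int × Int :=
    sp.foldl (fun st p =>
      if some p.1 ≠ st.1 then (some p.1, p.2, max st.2.2 st.2.1)
      else (st.1, st.2.1 + p.2, st.2.2)) (none, 0, 0)
  max st.2.2 st.2.1

-- ===== PRECONDITION & SPEC =====
def Spec_process (B : List Int) (out : Int) : Prop := out = process_alt B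
instance (B : List Int) (out : Int) : Decidable (Spec_process B out) := by unfold Spec_process; infer_instance

-- ===== CLAIM (what is proved, stated in full; the proofs are below) =====
def Claim_equal_process : Prop := ∀ (B : List Int), Dom_process B → Spec_process B (process B)

-- ===== LEMMAS AND PROOFS =====

-- sum of the values of the pairs whose key is k (the group sum)
def pvS (ps : List (Int × Int)) (k : Int) : Int :=
  ((ps.filter (fun p => p.1 == k)).map (·.2)).sum

-- A's loop body, as a function of the pair (i, B[i])
def pvStepA (d : PySem.Dict Int (List (List Int) × Int)) (p : Int × Int) :
    PySem.Dict Int (List (List Int) × Int) :=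
  let x := p.1 - p.2
  let d1 := if d.contains x then d else d.insert x ([], 0)
  d1.modify x ([], 0) (fun q => (q.1 ++ [[p.1, p.2]], q.2 + p.2))

-- B's loop body
def pvStepB (st : Option Int × Int × Int) (p : Int × Int) : Option Int × Int × Int :=
  if some p.1 ≠ st.1 then (some p.1, p.2, max st.2.2 st.2.1)
  else (st.1, st.2.1 + p.2, st.2.2)

def pvKey (p : Int × Int) : Int := p.1 - p.2

theorem pvS_cons (p : Int × Int) (t : List (Int × Int)) (x : Int) :
    pvS (p :: t) x = (if p.1 = x then p.2 else 0) + pvS t x := by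
  simp only [pvS, List.filter_cons]
  by_cases h : p.1 = x <;> simp [h]

theorem pvS_eq_zero (ps : List (Int × Int)) (x : Int) (h : x ∉ ps.map Prod.fst) :
    pvS ps x = 0 := by
  have : ps.filter (fun p => p.1 == x) = [] := by
    apply List.filter_eq_nil_iff.mpr
    intro p hp
    simp only [beq_iff_eq]
    exact fun he => h (List.mem_map.mpr ⟨p, hp, he⟩)
  simp [pvS, this]

theorem pvS_perm (ps qs : List (Int × Int)) (h : ps.Perm qs) (x : Int) :
    pvS ps x = pvS qs x := by
  unfold pvS
  exact List.Perm.sum_eq (List.Perm.map _ (List.Perm.filter _ h))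

theorem pvStepA_getD (d : PySem.Dict Int (List (List Int) × Int)) (p : Int × Int) (k : Int) :
    ((pvStepA d p).getD k ([], 0)).2 =
      (d.getD k ([], 0)).2 + (if p.1 - p.2 = k then p.2 else 0) := by
  unfold pvStepA
  by_cases hc : d.contains (p.1 - p.2) <;>
    simp [hc, PySem.Dict.getD_modify, PySem.Dict.getD_insert] <;>
    by_cases hk : k = p.1 - p.2 <;>
    simp [hk, PySem.Dict.getD_of_not_contains, hc] <;> omega

theorem pvStepA_keys (d : PySem.Dict Int (List (List Int) × Int)) (p : Int × Int) :
    (pvStepA d p).keys = PySem.Set.add d.keys (p.1 - p.2) := by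
  unfold pvStepA
  rw [PySem.Dict.keys_modify]
  by_cases hc : d.contains (p.1 - p.2)
  · rw [if_pos hc, PySem.Dict.keys_insert_of_contains _ _ hc]
    have hm : p.1 - p.2 ∈ d.keys := (PySem.Dict.contains_iff_mem_keys d _).mp hc
    simp [PySem.Set.add, PySem.Set.contains, hm]
  · rw [if_neg hc]
    rw [PySem.Dict.keys_insert_of_contains _ _ (PySem.Dict.contains_insert_self d _ _),
      PySem.Dict.keys_insert_of_not_contains _ _ (by simpa using hc)]
    have hm : p.1 - p.2 ∉ d.keys := fun m => hc ((PySem.Dict.contains_iff_mem_keys d _).mpr m)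
    simp [PySem.Set.add, PySem.Set.contains, hm]

theorem pvFoldA_getD (l : List (Int × Int)) (d : PySem.Dict Int (List (List Int) × Int)) (k : Int) :
    ((l.foldl pvStepA d).getD k ([], 0)).2 =
      (d.getD k ([], 0)).2 + pvS (l.map (fun p => (pvKey p, p.2))) k := by
  induction l generalizing d with
  | nil => simp [pvS]
  | cons p t ih =>
    simp only [List.foldl_cons, List.map_cons, ih, pvStepA_getD, pvS_cons, pvKey]
    omega

theorem pvFoldA_keys (l : List (Int × Int)) (d : PySem.Dict Int (List (List Int) × Int)) :
    (l.foldl pvStepA d).keys = PySem.Set.update d.keys (l.map pvKey) := by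
  induction l generalizing d with
  | nil => simp [PySem.Set.update]
  | cons p t ih =>
    simp only [List.foldl_cons, ih, pvStepA_keys, List.map_cons]
    rfl

theorem pvUpdate_cons_notmem {x : Int} (l : List Int) (s : PySem.Set Int) (h : x ∉ l) :
    PySem.Set.update (x :: s) l = x :: PySem.Set.update s l := by
  induction l generalizing s with
  | nil => rfl
  | cons y t ih =>
    have hyx : ¬(x == y) = true := by
      simp only [beq_iff_eq]; rintro rfl; exact h (List.mem_cons_self)
    have hyx' : y ≠ x := fun he => hyx (by simp [he])
    have hadd : PySem.Set.add (x :: s) y = x :: PySem.Set.add s y := by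
      simp only [PySem.Set.add, PySem.Set.contains, List.contains_cons]
      by_cases hy : y ∈ s <;> simp [hyx', hy]
    simp only [PySem.Set.update, List.foldl_cons, hadd]
    exact ih _ (fun hm => h (List.mem_cons_of_mem _ hm))

theorem pvOfList_cons_notmem {k : Int} (l : List Int) (h : k ∉ l) :
    PySem.Set.ofList (k :: l) = k :: PySem.Set.ofList l := by
  have h1 : PySem.Set.ofList (k :: l) = PySem.Set.update [k] l := by
    simp [PySem.Set.ofList, PySem.Set.update, PySem.Set.add, PySem.Set.empty,
      PySem.Set.contains]
  have h2 : PySem.Set.ofList l = PySem.Set.update [] l := rfl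
  rw [h1, h2, pvUpdate_cons_notmem l [] h]

theorem pvOfList_cons_mem {k : Int} (l : List Int) (hs : l.Pairwise (· ≤ ·))
    (hle : ∀ y ∈ l, k ≤ y) (h : k ∈ l) :
    PySem.Set.ofList (k :: l) = PySem.Set.ofList l := by
  cases l with
  | nil => cases h
  | cons y t =>
    have hyk : y = k := by
      rcases List.mem_cons.mp h with h' | h'
      · exact h'.symm
      · have h1 : k ≤ y := hle y List.mem_cons_self
        have h2 : y ≤ k := (List.pairwise_cons.mp hs).1 k h'
        omega
    subst hyk
    simp [PySem.Set.ofList, PySem.Set.add, PySem.Set.empty,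
      PySem.Set.contains]

-- the scan over a key-sorted pair list computes the max of 0 and the group sums
theorem pvScanMain (ps : List (Int × Int)) (rk : Option Int) (rs best : Int)
    (hs : (ps.map Prod.fst).Pairwise (· ≤ ·))
    (hle : ∀ p ∈ ps, ∀ k, rk = some k → k ≤ p.1) :
    max (ps.foldl pvStepB (rk, rs, best)).2.2 (ps.foldl pvStepB (rk, rs, best)).2.1 =
      (PySem.Set.ofList (ps.map Prod.fst)).foldl
        (fun m x => max m (pvS ps x + if rk = some x then rs else 0))
        (if (ps.map Prod.fst).any (fun x => rk == some x) then best else max best rs) := by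
  induction ps generalizing rk rs best with
  | nil => simp
  | cons p t ih =>
    have hs' : (t.map Prod.fst).Pairwise (· ≤ ·) := (List.pairwise_cons.mp (by simpa using hs)).2
    have hhead : ∀ y ∈ t.map Prod.fst, p.1 ≤ y :=
      (List.pairwise_cons.mp (by simpa using hs)).1
    simp only [List.foldl_cons]
    by_cases hrk : rk = some p.1
    · -- the run continues
      subst hrk
      have hstep : pvStepB (some p.1, rs, best) p = (some p.1, rs + p.2, best) := by
        simp [pvStepB]
      rw [hstep, ih _ _ _ hs' (fun q hq k hk => by
        cases hk; exact hhead q.1 (List.mem_map_of_mem hq))]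
      by_cases hmem : p.1 ∈ t.map Prod.fst
      · rw [List.map_cons, pvOfList_cons_mem (t.map Prod.fst) hs' hhead hmem]
        have hany : (t.map Prod.fst).any (fun x => (some p.1 : Option Int) == some x) = true := by
          simp only [List.any_eq_true]
          exact ⟨p.1, hmem, by simp⟩
        rw [hany]
        simp only [List.map_cons, List.any_cons, hany, Bool.or_true, if_true,
          beq_iff_eq, Option.some.injEq]
        apply PySem.List.foldl_congr_mem
        intro acc x hx
        rw [pvS_cons]
        by_cases hxk : p.1 = x <;> simp [hxk, eq_comm (a := x)] <;> omega
      · rw [List.map_cons, pvOfList_cons_notmem (t.map Prod.fst) hmem]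
        have hany : (t.map Prod.fst).any (fun x => (some p.1 : Option Int) == some x) = false := by
          simp only [List.any_eq_false]
          intro x hx
          simp only [beq_iff_eq, Option.some.injEq]
          rintro rfl; exact hmem hx
        rw [hany]
        simp only [List.map_cons, List.any_cons, hany, Bool.or_false, beq_iff_eq,
          Option.some.injEq, if_true, List.foldl_cons]
        have h1 : pvS (p :: t) p.1 + rs = rs + p.2 := by
          rw [pvS_cons, pvS_eq_zero t p.1 hmem]; simp; omega
        simp only [Bool.false_eq_true, if_false]
        rw [h1]
        apply PySem.List.foldl_congr_mem
        intro acc x hx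
        have hxmem : x ∈ t.map Prod.fst := (PySem.Set.mem_ofList _ _).mp hx
        have hxk : x ≠ p.1 := fun he => hmem (he ▸ hxmem)
        have hno : ¬(p.1 = x) := fun h => hxk h.symm
        rw [pvS_cons]
        simp only [if_neg hno]
        omega
    · -- boundary: the run is finalised and a new run starts
      have hstep : pvStepB (rk, rs, best) p = (some p.1, p.2, max best rs) := by
        have hne' : some p.1 ≠ rk := fun (h : some p.1 = rk) => hrk h.symm
        simp [pvStepB, hne']
      have hne : ∀ x ∈ (p :: t).map Prod.fst, rk ≠ some x := by
        intro x hx heq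
        simp only [List.map_cons, List.mem_cons] at hx
        rcases hx with rfl | hx'
        · exact hrk heq
        · have hxle : x ≤ p.1 := hle p List.mem_cons_self x heq
          have hxge : p.1 ≤ x := hhead x hx'
          have hxeq : x = p.1 := by omega
          exact hrk (hxeq ▸ heq)
      have hany0 : ((p :: t).map Prod.fst).any (fun x => rk == some x) = false := by
        simp only [List.any_eq_false]
        intro x hx
        simpa using hne x hx
      rw [hstep, ih _ _ _ hs' (fun q hq k hk => by
        cases hk; exact hhead q.1 (List.mem_map_of_mem hq)), hany0]
      by_cases hmem : p.1 ∈ t.map Prod.fst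
      · rw [List.map_cons, pvOfList_cons_mem (t.map Prod.fst) hs' hhead hmem]
        have hany : (t.map Prod.fst).any (fun x => (some p.1 : Option Int) == some x) = true := by
          simp only [List.any_eq_true]
          exact ⟨p.1, hmem, by simp⟩
        rw [hany, if_pos rfl]
        apply PySem.List.foldl_congr_mem
        intro acc x hx
        have hxmem : x ∈ t.map Prod.fst := (PySem.Set.mem_ofList _ _).mp hx
        have hrkx : ¬(rk = some x) := hne x (by simp [hxmem])
        rw [pvS_cons]
        by_cases hxk : p.1 = x <;> simp [hxk, hrkx, eq_comm (a := x)] <;> omega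
      · rw [List.map_cons, pvOfList_cons_notmem (t.map Prod.fst) hmem]
        have hany : (t.map Prod.fst).any (fun x => (some p.1 : Option Int) == some x) = false := by
          simp only [List.any_eq_false]
          intro x hx
          simp only [beq_iff_eq, Option.some.injEq]
          rintro rfl; exact hmem hx
        rw [hany, List.foldl_cons]
        have hrkp : ¬(rk = some p.1) := hrk
        have h2 : max (max best rs) (pvS (p :: t) p.1 + (if rk = some p.1 then rs else 0)) =
            max (max best rs) p.2 := by
          rw [pvS_cons, pvS_eq_zero t p.1 hmem]
          simp [hrkp]
        simp only [Bool.false_eq_true, if_false]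
        rw [h2]
        apply PySem.List.foldl_congr_mem
        intro acc x hx
        have hxmem : x ∈ t.map Prod.fst := (PySem.Set.mem_ofList _ _).mp hx
        have hxk : x ≠ p.1 := fun he => hmem (he ▸ hxmem)
        have hrkx : ¬(rk = some x) := hne x (by simp [hxmem])
        have hno : ¬(p.1 = x) := fun h => hxk h.symm
        have hno2 : ¬((some p.1 : Option Int) = some x) := by simpa using hno
        rw [pvS_cons]
        simp only [if_neg hno, if_neg hrkx, if_neg hno2]
        omega

-- A computes the max of 0 and the group sums, taken over the first-occurrence-ordered distinct keys
theorem processA_eq (B : List Int) :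
    process B =
      (PySem.Set.ofList (((PySem.List.enumerate B 0).map (fun p => (p.1 - p.2, p.2))).map Prod.fst)).foldl
        (fun m x => max m (pvS ((PySem.List.enumerate B 0).map (fun p => (p.1 - p.2, p.2))) x)) 0 := by
  unfold process
  have hfold : (PySem.List.pyRange 0 (PySem.List.len B) 1).foldl
      (fun d i =>
        let bi := PySem.List.pyGetD B i 0
        let x := i - bi
        let d := if d.contains x then d else d.insert x ([], 0)
        d.modify x ([], 0) (fun q => (q.1 ++ [[i, bi]], q.2 + bi))) PySem.Dict.empty =
      (PySem.List.enumerate B 0).foldl pvStepA PySem.Dict.empty := by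
    rw [PySem.List.enumerate_eq_map_pyRange B 0, List.foldl_map]
    rfl
  simp only [hfold]
  have hkeys : ((PySem.List.enumerate B 0).foldl pvStepA PySem.Dict.empty).keys =
      PySem.Set.ofList (((PySem.List.enumerate B 0).map (fun p => (p.1 - p.2, p.2))).map Prod.fst) := by
    rw [pvFoldA_keys]
    simp only [PySem.Dict.keys_empty, List.map_map]
    rfl
  rw [hkeys]
  apply PySem.List.foldl_congr_mem
  intro acc x _
  rw [pvFoldA_getD]
  simp only [PySem.Dict.getD_empty]
  have : ((PySem.List.enumerate B 0).map (fun p => (pvKey p, p.2))) =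
      ((PySem.List.enumerate B 0).map (fun p => (p.1 - p.2, p.2))) := rfl
  rw [this]
  omega

-- B computes the same max over the sorted pair list
theorem processB_eq (B : List Int) :
    process_alt B =
      (PySem.Set.ofList ((PySem.List.sorted ((PySem.List.enumerate B 0).map (fun p => (p.1 - p.2, p.2)))
          (fun p => p.1) false).map Prod.fst)).foldl
        (fun m x => max m (pvS (PySem.List.sorted ((PySem.List.enumerate B 0).map (fun p => (p.1 - p.2, p.2)))
          (fun p => p.1) false) x)) 0 := by
  have hdef : process_alt B =
      max ((PySem.List.sorted ((PySem.List.enumerate B 0).map (fun p => (p.1 - p.2, p.2)))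
          (fun p => p.1) false).foldl pvStepB (none, 0, 0)).2.2
        ((PySem.List.sorted ((PySem.List.enumerate B 0).map (fun p => (p.1 - p.2, p.2)))
          (fun p => p.1) false).foldl pvStepB (none, 0, 0)).2.1 := rfl
  have hs : ((PySem.List.sorted ((PySem.List.enumerate B 0).map (fun p => (p.1 - p.2, p.2)))
      (fun p => p.1) false).map Prod.fst).Pairwise (· ≤ ·) :=
    List.pairwise_map.mpr (PySem.List.sorted_pairwise _ _)
  have hle : ∀ p ∈ PySem.List.sorted ((PySem.List.enumerate B 0).map (fun p => (p.1 - p.2, p.2)))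
      (fun p => p.1) false, ∀ k : Int, (none : Option Int) = some k → k ≤ p.1 := by
    intro p _ k hk; cases hk
  rw [hdef, pvScanMain (PySem.List.sorted ((PySem.List.enumerate B 0).map (fun p => (p.1 - p.2, p.2)))
    (fun p => p.1) false) none 0 0 hs hle]
  have hany : (((PySem.List.sorted ((PySem.List.enumerate B 0).map (fun p => (p.1 - p.2, p.2)))
      (fun p => p.1) false).map Prod.fst).any (fun x => (none : Option Int) == some x)) = false := by
    simp [List.any_eq_false]
  rw [hany]
  simp only [Bool.false_eq_true, if_false, max_self]
  apply PySem.List.foldl_congr_mem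
  intro acc x _
  simp

theorem process_spec_aux (B : List Int) : process B = process_alt B := by
  rw [processA_eq, processB_eq]
  have hperm : (PySem.List.sorted ((PySem.List.enumerate B 0).map (fun p => (p.1 - p.2, p.2)))
      (fun p => p.1) false).Perm ((PySem.List.enumerate B 0).map (fun p => (p.1 - p.2, p.2))) :=
    PySem.List.sorted_perm _ _ _
  have hS : ∀ x, pvS (PySem.List.sorted ((PySem.List.enumerate B 0).map (fun p => (p.1 - p.2, p.2)))
      (fun p => p.1) false) x = pvS ((PySem.List.enumerate B 0).map (fun p => (p.1 - p.2, p.2))) x :=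
    fun x => pvS_perm _ _ hperm x
  have hkperm : (PySem.Set.ofList ((PySem.List.sorted ((PySem.List.enumerate B 0).map (fun p => (p.1 - p.2, p.2)))
      (fun p => p.1) false).map Prod.fst)).Perm
      (PySem.Set.ofList (((PySem.List.enumerate B 0).map (fun p => (p.1 - p.2, p.2))).map Prod.fst)) := by
    apply List.perm_of_nodup_nodup_toFinset_eq (PySem.Set.nodup_ofList _) (PySem.Set.nodup_ofList _)
    ext a
    simp only [List.mem_toFinset, PySem.Set.mem_ofList]
    exact ⟨fun h => (hperm.map Prod.fst).mem_iff.mp h, fun h => (hperm.map Prod.fst).mem_iff.mpr h⟩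
  symm
  calc (PySem.Set.ofList ((PySem.List.sorted ((PySem.List.enumerate B 0).map (fun p => (p.1 - p.2, p.2)))
          (fun p => p.1) false).map Prod.fst)).foldl
        (fun m x => max m (pvS (PySem.List.sorted ((PySem.List.enumerate B 0).map (fun p => (p.1 - p.2, p.2)))
          (fun p => p.1) false) x)) 0
      = (PySem.Set.ofList ((PySem.List.sorted ((PySem.List.enumerate B 0).map (fun p => (p.1 - p.2, p.2)))
          (fun p => p.1) false).map Prod.fst)).foldl
        (fun m x => max m (pvS ((PySem.List.enumerate B 0).map (fun p => (p.1 - p.2, p.2))) x)) 0 := by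
        apply PySem.List.foldl_congr_mem
        intro acc x _
        rw [hS]
    _ = (PySem.Set.ofList (((PySem.List.enumerate B 0).map (fun p => (p.1 - p.2, p.2))).map Prod.fst)).foldl
        (fun m x => max m (pvS ((PySem.List.enumerate B 0).map (fun p => (p.1 - p.2, p.2))) x)) 0 := by
        exact @List.Perm.foldl_eq _ _ _ _ _ ⟨fun b a c => by simp [max_right_comm]⟩ hkperm 0

-- ===== VERDICT (by name: the statement is the Claim_ definition above) =====
theorem process_spec : Claim_equal_process := by
  intro B _
  unfold Spec_process
  exact process_spec_aux B
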